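-- pv_equiv track=rewrite | github.com/mayflower/contextmine | packages/core/contextmine_core/exports/mermaid_c4.py | _select_code_scope_component
-- ===== SOURCE A (Python) =====
-- def _select_code_scope_component(
--     component_to_paths: dict[str, set[str]],
--     c4_scope: str | None,
--     warnings: list[str],
-- ) -> str | None:
--     """Select the component to scope the code view to."""
--     if not component_to_paths:
--         return None
--     selected: str | None = None
--     if c4_scope:
--         scope = c4_scope.lower()
--         for key in component_to_paths:
--             _, container, component = key.split("/", 2)
--             if scope in {key.lower(), container.lower(), component.lower()}:
--                 selected = key
--                 break
--         if selected is None: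
--             warnings.append(
--                 f'No component/file scope matched "{c4_scope}"; defaulted to largest component.'
--             )
--     if selected is None:
--         selected = max(component_to_paths.items(), key=lambda item: len(item[1]))[0]
--     return selected
-- ===== SOURCE B (Python) =====
-- # B: single fused pass over the dict items, simultaneously recording the first scope
-- # match (the split is only attempted while no match has been found yet, so B raises
-- # exactly where A raises) and tracking the running largest component with strict > for
-- # first-wins ties. A instead runs a break-out match loop and then a separate max() pass.
-- # Mutates `warnings` exactly like A; equivalence is about the return value.
-- def _select_code_scope_component(
--     component_to_paths,
--     c4_scope,
--     warnings,
-- ):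
--     if not component_to_paths:
--         return None
--     scope = c4_scope.lower() if c4_scope else None
--     selected = None
--     best_key = None
--     best_size = -1
--     for key, paths in component_to_paths.items():
--         if scope is not None and selected is None:
--             _, container, component = key.split("/", 2)
--             if scope in (key.lower(), container.lower(), component.lower()):
--                 selected = key
--         if len(paths) > best_size:
--             best_key = key
--             best_size = len(paths)
--     if scope is not None and selected is None:
--         warnings.append(
--             f'No component/file scope matched "{c4_scope}"; defaulted to largest component.'
--         )
--     return selected if selected is not None else best_key
-- ===== Notes on version B (the rewrite author's own statement) =====
-- stated objective: alternative
-- what changed: A runs a break-out matching loop over the keys and then a separate max() pass over the items; B makes one fused pass over the items that records the first scope match (splitting keys only while no match is found yet, so it raises exactly where A does) and tracks the running largest component with strict > for first-wins ties.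
import Mathlib
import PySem

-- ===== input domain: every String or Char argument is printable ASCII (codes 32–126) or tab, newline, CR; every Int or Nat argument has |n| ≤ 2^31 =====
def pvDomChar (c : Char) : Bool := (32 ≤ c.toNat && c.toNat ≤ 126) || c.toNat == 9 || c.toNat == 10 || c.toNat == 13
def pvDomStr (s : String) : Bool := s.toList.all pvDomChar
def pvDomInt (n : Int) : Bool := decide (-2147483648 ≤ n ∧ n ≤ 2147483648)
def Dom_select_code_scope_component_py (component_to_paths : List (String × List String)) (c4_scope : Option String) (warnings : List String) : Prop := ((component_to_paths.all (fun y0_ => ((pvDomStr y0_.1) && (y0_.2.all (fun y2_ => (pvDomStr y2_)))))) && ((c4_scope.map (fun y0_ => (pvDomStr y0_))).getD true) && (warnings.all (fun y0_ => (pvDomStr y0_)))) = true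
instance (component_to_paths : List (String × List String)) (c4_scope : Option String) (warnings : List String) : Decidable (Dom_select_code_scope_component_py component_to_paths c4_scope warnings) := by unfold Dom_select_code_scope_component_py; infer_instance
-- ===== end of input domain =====

-- B fuses A's break-out match loop and A's separate max() pass into ONE pass over the
-- items (objective: alternative decomposition); B splits a key only while no match has
-- been found yet, so it raises exactly where A raises. Both A and B append the same
-- warning to `warnings` (a side effect); the equivalence proved here is about the
-- RETURN value only.

-- ===== PORT A =====
-- A's `for key in component_to_paths: … break` match loop: first key whose split matches
-- the lowered scope. On a key with fewer than two '/' Python raises ValueError (unpack of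
-- < 3 parts): such inputs are outside Pre_; the port skips the key there.
def aScopeLoop (scope : String) : List String → Option String
  | [] => none
  | key :: rest =>
    match PySem.Str.splitMax? key "/" 2 with
    | some [_, container, component] =>
      if PySem.Set.contains (PySem.Set.ofList
          [PySem.Str.lower key, PySem.Str.lower container, PySem.Str.lower component]) scope
      then some key
      else aScopeLoop scope rest
    | _ => aScopeLoop scope rest  -- ValueError in Python; excluded by Pre_

def select_code_scope_component_py (component_to_paths : List (String × List String)) (c4_scope : Option String) (warnings : List String) : Option String :=
  let d := PySem.Dict.ofList component_to_paths   -- the dict parameter (insertion order, overwrite)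
  if d.items = [] then none                        -- `if not component_to_paths: return None`
  else
    let selected : Option String :=
      match c4_scope with                          -- `if c4_scope:` (truthy = some non-empty string)
      | some s => if s = "" then none else aScopeLoop (PySem.Str.lower s) d.keys
      | none => none
    match selected with
    | some k => some k
    | none =>                                      -- max(component_to_paths.items(), key=lambda item: len(item[1]))[0]
      match PySem.List.max? d.items (fun item => ((PySem.Set.ofList item.2).length : Int)) with
      | some item => some item.1
      | none => none                               -- unreachable: d.items ≠ []

-- ===== PORT B =====
-- B's single loop body: state = (selected, best_key, best_size). The split is attempted
-- only while selected is still None (exactly as in Source B).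
def bStep (scope? : Option String) (st : Option String × Option String × Int) (item : String × List String) : Option String × Option String × Int :=
  let sel : Option String :=
    match scope? with
    | none => st.1
    | some scope =>
      match st.1 with
      | some k => some k
      | none =>
        match PySem.Str.splitMax? item.1 "/" 2 with
        | some [_, container, component] =>
          if [PySem.Str.lower item.1, PySem.Str.lower container,
              PySem.Str.lower component].contains scope
          then some item.1
          else none
        | _ => none  -- ValueError in Python; excluded by Pre_
  if st.2.2 < ((PySem.Set.ofList item.2).length : Int)
  then (sel, some item.1, ((PySem.Set.ofList item.2).length : Int))
  else (sel, st.2.1, st.2.2)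

def select_code_scope_component_py_alt (component_to_paths : List (String × List String)) (c4_scope : Option String) (warnings : List String) : Option String :=
  let d := PySem.Dict.ofList component_to_paths
  if d.items = [] then none
  else
    let scope? : Option String :=
      match c4_scope with
      | some s => if s = "" then none else some (PySem.Str.lower s)
      | none => none
    let st := d.items.foldl (bStep scope?) (none, none, -1)
    match st.1 with
    | some k => some k
    | none => st.2.1

-- ===== PRECONDITION & SPEC =====
-- does this key's 3-way split match the (already lowered) scope?
def keyMatches (scope k : String) : Bool :=
  match PySem.Str.splitMax? k "/" 2 with
  | some [_, container, component] =>
    [PySem.Str.lower k, PySem.Str.lower container, PySem.Str.lower component].contains scope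
  | _ => false

-- Pre_ excludes exactly the inputs on which A raises ValueError: a truthy c4_scope and
-- some dict key with fewer than two '/' that is reached before any matching key (B's
-- fused pass raises there too, at the same key).
def Pre_select_code_scope_component_py (component_to_paths : List (String × List String)) (c4_scope : Option String) (warnings : List String) : Prop :=
  c4_scope.getD "" ≠ "" →
    ∀ i < ((PySem.Dict.ofList component_to_paths).keys).length,
      PySem.Str.count (((PySem.Dict.ofList component_to_paths).keys).getD i "") "/" < 2 →
      ∃ j < i, keyMatches (PySem.Str.lower (c4_scope.getD ""))
        (((PySem.Dict.ofList component_to_paths).keys).getD j "") = true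
instance (component_to_paths : List (String × List String)) (c4_scope : Option String) (warnings : List String) : Decidable (Pre_select_code_scope_component_py component_to_paths c4_scope warnings) := by unfold Pre_select_code_scope_component_py; infer_instance

def pvWitness_select_code_scope_component_py : (List (String × List String)) × Option String × List String :=
  ([("src/app/core", ["a.py", "b.py"]), ("src/app/ui", ["c.py"])], some "UI", [])

def Spec_select_code_scope_component_py (component_to_paths : List (String × List String)) (c4_scope : Option String) (warnings : List String) (out : Option String) : Prop := out = select_code_scope_component_py_alt component_to_paths c4_scope warnings
instance (component_to_paths : List (String × List String)) (c4_scope : Option String) (warnings : List String) (out : Option String) : Decidable (Spec_select_code_scope_component_py component_to_paths c4_scope warnings out) := by unfold Spec_select_code_scope_component_py; infer_instance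

-- ===== CLAIM (what is proved, stated in full; the proofs are below) =====
def Claim_equal_select_code_scope_component_py : Prop := ∀ (component_to_paths : List (String × List String)) (c4_scope : Option String) (warnings : List String), Dom_select_code_scope_component_py component_to_paths c4_scope warnings → Pre_select_code_scope_component_py component_to_paths c4_scope warnings → Spec_select_code_scope_component_py component_to_paths c4_scope warnings (select_code_scope_component_py component_to_paths c4_scope warnings)

-- ===== LEMMAS AND PROOFS =====

-- proof-only decomposition of B's fused loop body into its two independent components
def selStep (scope? : Option String) (sel : Option String) (item : String × List String) : Option String :=
  match scope? with
  | none => sel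
  | some scope =>
    match sel with
    | some k => some k
    | none =>
      match PySem.Str.splitMax? item.1 "/" 2 with
      | some [_, container, component] =>
        if [PySem.Str.lower item.1, PySem.Str.lower container,
            PySem.Str.lower component].contains scope
        then some item.1
        else none
      | _ => none

def maxStep (st : Option String × Int) (item : String × List String) : Option String × Int :=
  if st.2 < ((PySem.Set.ofList item.2).length : Int)
  then (some item.1, ((PySem.Set.ofList item.2).length : Int))
  else st

def aMax (m x : String × List String) : String × List String :=
  if ((PySem.Set.ofList m.2).length : Int) < ((PySem.Set.ofList x.2).length : Int) then x else m

theorem bStep_split (scope? : Option String) (st : Option String × Option String × Int) (item : String × List String) :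
    bStep scope? st item = (selStep scope? st.1 item, maxStep st.2 item) := by
  simp only [bStep, selStep, maxStep]
  split <;> rfl

theorem foldl_bStep_split (scope? : Option String) (items : List (String × List String)) (s0 : Option String) (m0 : Option String × Int) :
    items.foldl (bStep scope?) (s0, m0) = (items.foldl (selStep scope?) s0, items.foldl maxStep m0) := by
  induction items generalizing s0 m0 with
  | nil => rfl
  | cons x t ih => simp only [List.foldl_cons, bStep_split]; exact ih _ _

theorem foldl_selStep_scopeNone (items : List (String × List String)) (s0 : Option String) :
    items.foldl (selStep none) s0 = s0 := by
  induction items generalizing s0 with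
  | nil => rfl
  | cons x t ih => exact ih s0

theorem foldl_selStep_some (scope? : Option String) (items : List (String × List String)) (k : String) :
    items.foldl (selStep scope?) (some k) = some k := by
  induction items with
  | nil => rfl
  | cons x t ih =>
    have hstep : selStep scope? (some k) x = some k := by
      cases scope? <;> rfl
    simp only [List.foldl_cons, hstep, ih]

theorem set_contains_eq_contains (L : List String) (a : String) :
    PySem.Set.contains (PySem.Set.ofList L) a = L.contains a := by
  simp only [PySem.Set.contains]
  rw [Bool.eq_iff_iff]
  simp [PySem.Set.mem_ofList]

theorem foldl_selStep_none (scope : String) (items : List (String × List String)) :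
    items.foldl (selStep (some scope)) none = aScopeLoop scope (items.map (·.1)) := by
  induction items with
  | nil => rfl
  | cons x t ih =>
    simp only [List.foldl_cons, List.map_cons, aScopeLoop]
    rcases h : PySem.Str.splitMax? x.1 "/" 2 with _ | ⟨_ | ⟨a, _ | ⟨b, _ | ⟨c, _ | ⟨e, l⟩⟩⟩⟩⟩ <;>
        simp only [selStep, h] <;> try exact ih
    rw [set_contains_eq_contains]
    by_cases hc : [PySem.Str.lower x.1, PySem.Str.lower b, PySem.Str.lower c].contains scope
    · simp only [hc, if_pos]
      simp [foldl_selStep_some]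
    · simp only [hc]
      simpa using ih

theorem foldl_maxStep_some (items : List (String × List String)) (m : String × List String) :
    items.foldl maxStep (some m.1, ((PySem.Set.ofList m.2).length : Int)) =
      (some (items.foldl aMax m).1, ((PySem.Set.ofList (items.foldl aMax m).2).length : Int)) := by
  induction items generalizing m with
  | nil => rfl
  | cons x t ih =>
    simp only [List.foldl_cons]
    have hstep : maxStep (some m.1, ((PySem.Set.ofList m.2).length : Int)) x =
        (some (aMax m x).1, ((PySem.Set.ofList (aMax m x).2).length : Int)) := by
      simp only [maxStep, aMax]
      split <;> rfl
    rw [hstep, ih]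

theorem max?_foldl_go (t : List (String × List String)) (m : String × List String) :
    t.foldl (fun acc x => match acc with
      | none => some x
      | some m => if ((PySem.Set.ofList m.2).length : Int) < ((PySem.Set.ofList x.2).length : Int)
                  then some x else some m) (some m) = some (t.foldl aMax m) := by
  induction t generalizing m with
  | nil => rfl
  | cons x t ih =>
    simp only [List.foldl_cons, aMax]
    split <;> exact ih _

theorem max?_cons (x : String × List String) (t : List (String × List String)) :
    PySem.List.max? (x :: t) (fun item => ((PySem.Set.ofList item.2).length : Int)) =
      some (t.foldl aMax x) := by
  simp only [PySem.List.max?, List.foldl_cons]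
  convert max?_foldl_go t x using 2
  funext acc y
  cases acc with
  | none => rfl
  | some m => exact if_congr Iff.rfl rfl rfl

theorem maxPart_eq (x : String × List String) (t : List (String × List String)) :
    ((x :: t).foldl maxStep (none, -1)).1 =
      (match PySem.List.max? (x :: t) (fun item => ((PySem.Set.ofList item.2).length : Int)) with
       | some item => some item.1
       | none => none) := by
  simp only [List.foldl_cons, max?_cons]
  have h1 : maxStep (none, -1) x = (some x.1, ((PySem.Set.ofList x.2).length : Int)) := by
    simp only [maxStep]
    rw [if_pos]
    exact lt_of_lt_of_le (by norm_num) (Int.natCast_nonneg _)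
  rw [h1, foldl_maxStep_some]

-- the core identity, over an arbitrary (nonempty) items list and optional lowered scope
theorem core (items : List (String × List String)) (hne : items ≠ []) (scopeO : Option String) :
    (match (match scopeO with
            | some sc => aScopeLoop sc (items.map (·.1))
            | none => none) with
     | some k => some k
     | none =>
       match PySem.List.max? items (fun item => ((PySem.Set.ofList item.2).length : Int)) with
       | some item => some item.1
       | none => none)
    = (match (items.foldl (bStep scopeO) (none, none, -1)).1 with
       | some k => some k
       | none => (items.foldl (bStep scopeO) (none, none, -1)).2.1) := by
  cases items with
  | nil => exact absurd rfl hne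
  | cons x t =>
    rw [foldl_bStep_split]
    have hsel : ((x :: t).foldl (selStep scopeO) none) =
        (match scopeO with
         | some sc => aScopeLoop sc ((x :: t).map (·.1))
         | none => none) := by
      cases scopeO with
      | none => exact foldl_selStep_scopeNone _ _
      | some sc => exact foldl_selStep_none sc (x :: t)
    rw [← hsel]
    cases hA : ((x :: t).foldl (selStep scopeO) none) with
    | some k => rfl
    | none => exact (maxPart_eq x t).symm

-- ===== VERDICT (by name: the statement is the Claim_ definition above) =====
theorem select_code_scope_component_py_spec : Claim_equal_select_code_scope_component_py := by
  intro ctp c4 w _ _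
  unfold Spec_select_code_scope_component_py
  unfold select_code_scope_component_py select_code_scope_component_py_alt
  simp only
  by_cases hnil : (PySem.Dict.ofList ctp).items = []
  · simp [hnil]
  · simp only [hnil, ite_false]
    have hkeys : (PySem.Dict.ofList ctp).keys = (PySem.Dict.ofList ctp).items.map (·.1) := rfl
    cases c4 with
    | none => exact core _ hnil none
    | some s =>
      by_cases hs : s = ""
      · simp only [hs]
        exact core _ hnil none
      · simp only [hs, ite_false, hkeys]
        exact core _ hnil (some (PySem.Str.lower s))
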